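-- pv_equiv track=rewrite | github.com/lewildfox/scripts | sbc/sbcHuaweiAlarms.py | filter_alarm_fields
-- ===== SOURCE A (Python) =====
-- def filter_alarm_fields(content: str) -> str:
--     """
--     Always return all alarm fields, even if empty
--     """
--     fields = [
--         "NE Name:",
--         "NE Type:",
--         "Severity:",
--         "Category:",
--         "Occurrence Time:",
--         "Clearance Time:",
--         "Location Information:",
--         "Alarm Name:",
--         "Alarm Explanation:",
--     ]
--
--     lines = content.splitlines()
--     result = []
--
--     for field in fields:
--         value = ""
--         for line in lines:
--             if line.strip().startswith(field):
--                 value = line.strip()[len(field):].strip()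
--                 break
--         result.append(f"{field}  {value}")
--
--     return "\n".join(result)
-- ===== SOURCE B (Python) =====
-- FIELDS = [
--     "NE Name:",
--     "NE Type:",
--     "Severity:",
--     "Category:",
--     "Occurrence Time:",
--     "Clearance Time:",
--     "Location Information:",
--     "Alarm Name:",
--     "Alarm Explanation:",
-- ]
--
--
-- def filter_alarm_fields(content: str) -> str:
--     """
--     Always return all alarm fields, even if empty
--     """
--     found = {}
--     for line in content.splitlines():
--         s = line.strip()
--         for field in FIELDS:
--             if field not in found and s.startswith(field):
--                 found[field] = s[len(field):].strip()
--     return "\n".join(f"{field}  {found.get(field, '')}" for field in FIELDS)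
-- ===== Notes on version B (the rewrite author's own statement) =====
-- stated objective: alternative
-- what changed: Replaces A's per-field rescans of all lines (fields x lines nested passes with break) by a single pass over the lines building a first-match dict index, followed by one output pass over the fixed field list.
import Mathlib
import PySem

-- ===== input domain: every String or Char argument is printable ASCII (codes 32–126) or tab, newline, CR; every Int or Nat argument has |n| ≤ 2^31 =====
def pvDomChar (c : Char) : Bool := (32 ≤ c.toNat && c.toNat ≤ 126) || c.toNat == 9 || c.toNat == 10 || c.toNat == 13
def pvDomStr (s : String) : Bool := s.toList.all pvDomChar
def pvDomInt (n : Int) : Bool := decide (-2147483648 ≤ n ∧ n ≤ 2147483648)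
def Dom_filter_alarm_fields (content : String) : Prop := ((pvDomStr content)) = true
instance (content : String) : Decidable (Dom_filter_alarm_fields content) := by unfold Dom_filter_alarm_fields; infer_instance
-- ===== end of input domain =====

-- B replaces A's per-field rescans of all lines by a single pass over the lines that
-- builds a first-match index (dict), plus one output pass over the fixed field list (objective: alternative).

-- ===== PORT A =====
-- the fixed field list (A's local `fields`; B's module-level `FIELDS` — same literal, shared here)
def alarmFields : List String :=
  ["NE Name:", "NE Type:", "Severity:", "Category:", "Occurrence Time:",
   "Clearance Time:", "Location Information:", "Alarm Name:", "Alarm Explanation:"]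

-- A's inner `for line in lines: … break` loop with `value = ""` initial accumulator
def aFind (field : String) (lines : List String) : String :=
  match lines with
  | [] => ""
  | line :: rest =>
    if PySem.Str.startswith (PySem.Str.strip line) field then
      PySem.Str.strip (PySem.Str.slice (PySem.Str.strip line) (some (PySem.Str.len field : Int)) none)
    else aFind field rest

def filter_alarm_fields (content : String) : String :=
  let lines := PySem.Str.splitlines content
  let result := alarmFields.foldl (fun result field => result ++ [field ++ "  " ++ aFind field lines]) []
  PySem.Str.join "\n" result

-- ===== PORT B =====
-- B's per-line body: record `s[len(field):].strip()` for each not-yet-seen matching field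
def bLine (d : PySem.Dict String String) (line : String) : PySem.Dict String String :=
  let s := PySem.Str.strip line
  alarmFields.foldl (fun d field =>
    if !d.contains field && PySem.Str.startswith s field then
      d.insert field (PySem.Str.strip (PySem.Str.slice s (some (PySem.Str.len field : Int)) none))
    else d) d

def filter_alarm_fields_alt (content : String) : String :=
  let found := (PySem.Str.splitlines content).foldl bLine PySem.Dict.empty
  PySem.Str.join "\n" (alarmFields.map (fun field => field ++ "  " ++ found.getD field ""))

-- ===== PRECONDITION & SPEC =====
def Spec_filter_alarm_fields (content : String) (out : String) : Prop := out = filter_alarm_fields_alt content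
instance (content : String) (out : String) : Decidable (Spec_filter_alarm_fields content out) := by unfold Spec_filter_alarm_fields; infer_instance

-- ===== CLAIM (what is proved, stated in full; the proofs are below) =====
def Claim_equal_filter_alarm_fields : Prop := ∀ (content : String), Dom_filter_alarm_fields content → Spec_filter_alarm_fields content (filter_alarm_fields content)

-- ===== LEMMAS AND PROOFS =====

-- the first value A's inner loop would find, as an Option
def firstVal (field : String) (lines : List String) : Option String :=
  match lines with
  | [] => none
  | line :: rest =>
    if PySem.Str.startswith (PySem.Str.strip line) field then
      some (PySem.Str.strip (PySem.Str.slice (PySem.Str.strip line) (some (PySem.Str.len field : Int)) none))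
    else firstVal field rest

lemma aFind_eq_firstVal (field : String) (lines : List String) :
    aFind field lines = (firstVal field lines).getD "" := by
  induction lines with
  | nil => rfl
  | cons l ls ih =>
    simp only [aFind, firstVal]
    split <;> simp [ih]

-- one line's inner fold over the field list, viewed through a single key f
lemma inner_get (fs : List String) (hnd : fs.Nodup) (s : String)
    (d : PySem.Dict String String) (f : String) :
    (fs.foldl (fun d field =>
      if !d.contains field && PySem.Str.startswith s field then
        d.insert field (PySem.Str.strip (PySem.Str.slice s (some (PySem.Str.len field : Int)) none))
      else d) d).get? f
    = if f ∈ fs ∧ d.get? f = none ∧ PySem.Str.startswith s f then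
        some (PySem.Str.strip (PySem.Str.slice s (some (PySem.Str.len f : Int)) none))
      else d.get? f := by
  induction fs generalizing d with
  | nil => simp
  | cons g fs ih =>
    obtain ⟨hg, hnd'⟩ := List.nodup_cons.mp hnd
    rw [List.foldl_cons, ih hnd']
    by_cases hf : f = g
    · subst hf
      cases h : d.get? f with
      | none =>
        by_cases hs : PySem.Chars.startswith s.toList f.toList = true
        · simp [hg, PySem.Dict.contains_eq_isSome_get?, h, hs, PySem.Dict.get?_insert_self]
        · simp [hg, PySem.Dict.contains_eq_isSome_get?, h, hs]
      | some v => simp [hg, PySem.Dict.contains_eq_isSome_get?, h]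
    · have hstep : ∀ (P : Bool) (w : String),
          ((if P then d.insert g w else d).get? f) = d.get? f := by
        intro P w
        split
        · exact PySem.Dict.get?_insert_of_ne d w hf
        · rfl
      rw [hstep]
      simp [hf]

-- the whole pass over the lines, viewed through a key f of the field list
lemma fold_get (lines : List String) (d : PySem.Dict String String) (f : String)
    (hf : f ∈ alarmFields) :
    ((lines.foldl bLine d).get? f) = (d.get? f).or (firstVal f lines) := by
  have hnd : alarmFields.Nodup := by decide
  induction lines generalizing d with
  | nil => simp [firstVal]
  | cons l ls ih =>
    rw [List.foldl_cons, ih]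
    have hb : (bLine d l).get? f
        = if f ∈ alarmFields ∧ d.get? f = none ∧ PySem.Str.startswith (PySem.Str.strip l) f then
            some (PySem.Str.strip (PySem.Str.slice (PySem.Str.strip l)
              (some (PySem.Str.len f : Int)) none))
          else d.get? f := by
      simp only [bLine]
      exact inner_get alarmFields hnd (PySem.Str.strip l) d f
    rw [hb]
    simp only [firstVal]
    by_cases hs : PySem.Chars.startswith (PySem.Chars.strip l.toList) f.toList = true
    · cases h : d.get? f with
      | none => simp [hf, hs]
      | some v => simp [hf, hs]
    · simp [hs]

theorem ports_agree (content : String) :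
    filter_alarm_fields content = filter_alarm_fields_alt content := by
  simp only [filter_alarm_fields, filter_alarm_fields_alt]
  rw [PySem.List.foldl_append_singleton_eq_map, List.nil_append]
  congr 1
  apply List.map_congr_left
  intro f hf
  rw [aFind_eq_firstVal, PySem.Dict.getD_eq_get?_getD, fold_get _ _ _ hf,
    PySem.Dict.get?_empty, Option.none_or]

-- ===== VERDICT (by name: the statement is the Claim_ definition above) =====
theorem filter_alarm_fields_spec : Claim_equal_filter_alarm_fields := by
  intro content _
  unfold Spec_filter_alarm_fields
  exact ports_agree content
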